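-- pv_equiv track=rewrite | github.com/AlfonMnz/Python-1DAW-Programacion | Ejercicios/Ejercicio37.py | segmentos
-- ===== SOURCE A (Python) =====
-- def primos(num):
--     res = ()
--     es_primo = True
--     if num < 2:
--         es_primo = False
--     for i in range(2, int((num) / 2) + 1):
--         if num % i == 0:
--             es_primo = False
--         if not es_primo:
--             return es_primo
--     return es_primo
--
-- def contador_primos(num):
--     res = 0
--     for i in range(num):
--         if primos(i):
--             res += 1
--     return res
--
-- def segmentos(lim, ancho):
--     lista=[]
--     for i in range(0, lim, ancho):
--         tupla = (i, (i + ancho))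
--         res = contador_primos((i + ancho)) - contador_primos(i)
--         tupla += res,
--         lista.append(tupla)
--     return lista
-- ===== SOURCE B (Python) =====
-- def _es_primo(n):
--     if n < 2:
--         return False
--     d = 2
--     while d * d <= n:
--         if n % d == 0:
--             return False
--         d += 1
--     return True
--
-- def segmentos(lim, ancho):
--     res = []
--     for i in range(0, lim, ancho):
--         hi = i + ancho
--         c = 0
--         for n in range(max(i, 2), hi):
--             if _es_primo(n):
--                 c += 1
--         res.append((i, hi, c))
--     return res
-- ===== Notes on version B (the rewrite author's own statement) =====
-- stated objective: faster
-- what changed: B counts each segment by a single direct scan of the window [max(i,2), i+ancho) with a sqrt-bounded trial-division primality test, instead of A's recomputation of the full prime count from 0 twice per segment with a num/2-bounded test.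
import Mathlib
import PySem

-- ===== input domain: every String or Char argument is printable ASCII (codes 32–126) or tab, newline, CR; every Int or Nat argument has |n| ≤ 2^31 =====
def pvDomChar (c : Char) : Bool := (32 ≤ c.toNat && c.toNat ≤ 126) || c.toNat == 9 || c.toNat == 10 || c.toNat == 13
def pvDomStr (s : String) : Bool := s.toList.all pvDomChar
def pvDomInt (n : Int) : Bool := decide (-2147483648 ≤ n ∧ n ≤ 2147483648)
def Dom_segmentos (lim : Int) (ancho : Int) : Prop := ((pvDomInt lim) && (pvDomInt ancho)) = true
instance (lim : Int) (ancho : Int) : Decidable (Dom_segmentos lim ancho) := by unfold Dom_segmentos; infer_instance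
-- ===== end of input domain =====

-- B replaces A's per-segment recount of all primes below each boundary (trial division up to num/2)
-- by one direct scan of each window with a sqrt-bounded trial division; measured faster (asymptotic).

-- ===== PORT A =====
-- early-return loop of primos: state is es_primo; returns as soon as it becomes False
def primosLoop (num : Int) : List Int → Bool → Bool
  | [], es => es
  | i :: rest, es =>
      let es' := if PySem.Int.mod num i = 0 then false else es
      if es' = false then es' else primosLoop num rest es'

-- int(num/2) is float division then truncation toward zero: Int.tdiv (exact for |num| ≤ 2^31)
def primos (num : Int) : Bool :=
  let es := if num < 2 then false else true
  primosLoop num (PySem.List.pyRange 2 (Int.tdiv num 2 + 1) 1) es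

def contador_primos (num : Int) : Int :=
  (PySem.List.pyRange 0 num 1).foldl (fun res i => if primos i then res + 1 else res) 0

def segmentos (lim : Int) (ancho : Int) : List (Int × Int × Int) :=
  (PySem.List.pyRange 0 lim ancho).foldl
    (fun lista i => lista ++ [(i, i + ancho, contador_primos (i + ancho) - contador_primos i)]) []

-- ===== PORT B =====
-- while d * d <= n: trial division up to the square root
def esPrimoLoop (n : Int) (d : Int) : Bool :=
  if d * d ≤ n then
    if PySem.Int.mod n d = 0 then false
    else esPrimoLoop n (d + 1)
  else true
termination_by (n + 1 - d).toNat
decreasing_by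
  have hdn : d ≤ n := by nlinarith
  omega

def esPrimo (n : Int) : Bool := if n < 2 then false else esPrimoLoop n 2

-- the inner 'for n in range(max(i, 2), hi)' counting loop of Source B
def cuentaVentana (i : Int) (ancho : Int) : Int :=
  (PySem.List.pyRange (max i 2) (i + ancho) 1).foldl
    (fun c n => if esPrimo n then c + 1 else c) 0

def segmentos_alt (lim : Int) (ancho : Int) : List (Int × Int × Int) :=
  (PySem.List.pyRange 0 lim ancho).foldl
    (fun res i => res ++ [(i, i + ancho, cuentaVentana i ancho)]) []

-- ===== PRECONDITION & SPEC =====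
-- Pre_ excludes only ancho = 0, on which Python's range raises ValueError (in A and in B alike).
def Pre_segmentos (lim : Int) (ancho : Int) : Prop := ancho ≠ 0
instance (lim : Int) (ancho : Int) : Decidable (Pre_segmentos lim ancho) := by unfold Pre_segmentos; infer_instance
def pvWitness_segmentos : Int × Int := (30, 7)

def Spec_segmentos (lim : Int) (ancho : Int) (out : List (Int × Int × Int)) : Prop := out = segmentos_alt lim ancho
instance (lim : Int) (ancho : Int) (out : List (Int × Int × Int)) : Decidable (Spec_segmentos lim ancho out) := by unfold Spec_segmentos; infer_instance

-- ===== CLAIM (what is proved, stated in full; the proofs are below) =====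
def Claim_equal_segmentos : Prop := ∀ (lim : Int) (ancho : Int), Dom_segmentos lim ancho → Pre_segmentos lim ancho → Spec_segmentos lim ancho (segmentos lim ancho)

-- ===== LEMMAS AND PROOFS =====

theorem primosLoop_false (num : Int) (l : List Int) : primosLoop num l false = false := by
  cases l <;> simp [primosLoop]

theorem primosLoop_true_iff (num : Int) (l : List Int) :
    primosLoop num l true = true ↔ ∀ i ∈ l, ¬ i ∣ num := by
  induction l with
  | nil => simp [primosLoop]
  | cons i rest ih =>
      by_cases h : PySem.Int.mod num i = 0
      · have hd : i ∣ num := (PySem.Int.mod_eq_zero_iff_dvd num i).mp h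
        simp only [primosLoop, h, if_true]
        simp only [Bool.false_eq_true, false_iff]
        intro hall
        exact hall i (by simp) hd
      · have hd : ¬ i ∣ num := fun hdvd => h ((PySem.Int.mod_eq_zero_iff_dvd num i).mpr hdvd)
        simp [primosLoop, h, ih, hd]

theorem esPrimoLoop_true_iff (n : Int) (d : Int) (hd : 2 ≤ d) :
    esPrimoLoop n d = true ↔ ∀ e, d ≤ e → e * e ≤ n → ¬ e ∣ n := by
  induction d using esPrimoLoop.induct n with
  | case1 d hle hmod =>
      have hdvd : d ∣ n := (PySem.Int.mod_eq_zero_iff_dvd n d).mp hmod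
      rw [esPrimoLoop, if_pos hle, if_pos hmod]
      simp only [Bool.false_eq_true, false_iff]
      intro hall
      exact hall d le_rfl hle hdvd
  | case2 d hle hmod ih =>
      have hdvd : ¬ d ∣ n := fun h => hmod ((PySem.Int.mod_eq_zero_iff_dvd n d).mpr h)
      rw [esPrimoLoop, if_pos hle, if_neg hmod]
      rw [ih (by omega)]
      constructor
      · intro h e hde hee
        rcases eq_or_lt_of_le hde with rfl | hlt
        · exact hdvd
        · exact h e (by omega) hee
      · intro h e hde hee
        exact h e (by omega) hee
  | case3 d hgt =>
      rw [esPrimoLoop]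
      simp [hgt]
      intro e hde hee
      exfalso
      have : d * d ≤ e * e := by nlinarith
      nlinarith

theorem divisor_bound (n : Int) (hn : 2 ≤ n) :
    (∀ i, 2 ≤ i → i ≤ Int.tdiv n 2 → ¬ i ∣ n) ↔ (∀ e, 2 ≤ e → e * e ≤ n → ¬ e ∣ n) := by
  have htd : ∀ i : Int, i ≤ Int.tdiv n 2 ↔ 2 * i ≤ n := by
    intro i
    rw [Int.tdiv_eq_ediv_of_nonneg (by omega)]
    omega
  constructor
  · intro H e he hee hdvd
    exact H e he ((htd e).mpr (by nlinarith)) hdvd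
  · intro H i hi hile hdvd
    have h2i : 2 * i ≤ n := (htd i).mp hile
    rcases hdvd with ⟨k, hk⟩
    have hk2 : 2 ≤ k := by nlinarith
    by_cases hii : i * i ≤ n
    · exact H i hi hii ⟨k, hk⟩
    · have hki : k < i := by nlinarith
      have hkk : k * k ≤ n := by nlinarith
      exact H k hk2 hkk ⟨i, by linarith [hk, mul_comm i k]⟩

theorem primos_eq_esPrimo (n : Int) : primos n = esPrimo n := by
  by_cases hn : n < 2
  · simp [primos, esPrimo, hn, primosLoop_false]
  · rw [not_lt] at hn
    have h1 : primos n = primosLoop n (PySem.List.pyRange 2 (Int.tdiv n 2 + 1) 1) true := by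
      simp [primos, not_lt.mpr hn]
    have h2 : esPrimo n = esPrimoLoop n 2 := by
      simp [esPrimo, not_lt.mpr hn]
    rw [h1, h2, Bool.eq_iff_iff, primosLoop_true_iff, esPrimoLoop_true_iff n 2 le_rfl]
    constructor
    · intro H
      refine (divisor_bound n hn).mp ?_
      intro i hi hile
      exact H i (PySem.List.mem_pyRange_one.mpr ⟨hi, by omega⟩)
    · intro H i hmem
      have hb := PySem.List.mem_pyRange_one.mp hmem
      exact (divisor_bound n hn).mpr H i hb.1 (by omega)

theorem contador_eq_countP (num : Int) :
    contador_primos num = ((PySem.List.pyRange 0 num 1).countP esPrimo : Int) := by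
  have hfe : primos = esPrimo := funext primos_eq_esPrimo
  simp [contador_primos, hfe, PySem.List.foldl_count_if]

theorem esPrimo_lt_two (n : Int) (h : n < 2) : esPrimo n = false := by
  simp [esPrimo, h]

theorem cuentaVentana_eq_countP (i : Int) (ancho : Int) :
    cuentaVentana i ancho = ((PySem.List.pyRange (max i 2) (i + ancho) 1).countP esPrimo : Int) := by
  simp [cuentaVentana, PySem.List.foldl_count_if]

theorem countP_low_zero (a b : Int) (hb : b ≤ 2) :
    (PySem.List.pyRange a b 1).countP esPrimo = 0 := by
  rw [List.countP_eq_zero]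
  intro x hx
  have := PySem.List.mem_pyRange_one.mp hx
  simp [esPrimo_lt_two x (by omega)]

-- the per-segment identity: difference of full recounts = count over the trimmed window
theorem segment_count (i : Int) (ancho : Int) (hi0 : 0 ≤ i) (hpos : 0 < ancho) :
    contador_primos (i + ancho) - contador_primos i = cuentaVentana i ancho := by
  rw [contador_eq_countP, contador_eq_countP, cuentaVentana_eq_countP]
  rw [PySem.List.pyRange_one_append 0 i (i + ancho) hi0 (by omega), List.countP_append]
  push_cast
  rw [add_sub_cancel_left]
  norm_cast
  rcases le_or_gt 2 i with h2 | h2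
  · rw [max_eq_left (by omega)]
  · rw [max_eq_right (by omega)]
    rcases le_or_gt (i + ancho) 2 with hle | hgt
    · rw [countP_low_zero i (i + ancho) hle, PySem.List.pyRange_one_eq_nil (by omega)]
      simp
    · rw [PySem.List.pyRange_one_append i 2 (i + ancho) (by omega) (by omega), List.countP_append,
        countP_low_zero i 2 le_rfl]
      simp

theorem segment_count_neg (i : Int) (ancho : Int) (hi0 : i ≤ 0) (hneg : ancho < 0) :
    contador_primos (i + ancho) - contador_primos i = cuentaVentana i ancho := by
  rw [contador_eq_countP, contador_eq_countP, cuentaVentana_eq_countP]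
  rw [PySem.List.pyRange_one_eq_nil (show i ≤ 0 by omega),
      PySem.List.pyRange_one_eq_nil (show i + ancho ≤ 0 by omega),
      PySem.List.pyRange_one_eq_nil (show i + ancho ≤ max i 2 by omega)]
  simp

-- ===== VERDICT (by name: the statement is the Claim_ definition above) =====
theorem segmentos_spec : Claim_equal_segmentos := by
  intro lim ancho _ hpre
  unfold Spec_segmentos segmentos segmentos_alt
  rw [PySem.List.foldl_append_singleton_eq_map, PySem.List.foldl_append_singleton_eq_map,
      List.nil_append, List.nil_append]
  apply List.map_congr_left
  intro i hmem
  rcases lt_or_gt_of_ne hpre with hneg | hpos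
  · have hb := (PySem.List.mem_pyRange_iff_of_neg hneg i).mp hmem
    rw [segment_count_neg i ancho (by omega) hneg]
  · have hb := (PySem.List.mem_pyRange_iff_of_pos hpos i).mp hmem
    rw [segment_count i ancho (by omega) hpos]
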